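-- pv_equiv track=rewrite | github.com/mathiasc4/advent-of-code | 2023/02/first.py | findHighestCubeCounts
-- ===== SOURCE A (Python) =====
-- def findHighestCubeCounts(sets: list[tuple[int, int, int]]) -> tuple[int, int, int]:
--     highestRedCount: int = -1
--     highestGreenCount: int = -1
--     highestBlueCount: int = -1
--
--     for set in sets:
--         redCount: int = set[0]
--         greenCount: int = set[1]
--         blueCount: int = set[2]
--
--         if redCount > highestRedCount:
--             highestRedCount = redCount
--
--         if greenCount > highestGreenCount:
--             highestGreenCount = greenCount
--
--         if blueCount > highestBlueCount:
--             highestBlueCount = blueCount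
--
--     return (highestRedCount, highestGreenCount, highestBlueCount)
-- ===== SOURCE B (Python) =====
-- def findHighestCubeCounts(sets: list[tuple[int, int, int]]) -> tuple[int, int, int]:
--     red = max([-1] + [s[0] for s in sets])
--     green = max([-1] + [s[1] for s in sets])
--     blue = max([-1] + [s[2] for s in sets])
--     return (red, green, blue)
-- ===== Notes on version B (the rewrite author's own statement) =====
-- stated objective: simpler
-- what changed: Replaces the single pass maintaining three accumulators with three independent per-column max passes, each seeded with -1 as an explicit candidate (max([-1] + [s[i] for s in sets])).
import Mathlib
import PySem

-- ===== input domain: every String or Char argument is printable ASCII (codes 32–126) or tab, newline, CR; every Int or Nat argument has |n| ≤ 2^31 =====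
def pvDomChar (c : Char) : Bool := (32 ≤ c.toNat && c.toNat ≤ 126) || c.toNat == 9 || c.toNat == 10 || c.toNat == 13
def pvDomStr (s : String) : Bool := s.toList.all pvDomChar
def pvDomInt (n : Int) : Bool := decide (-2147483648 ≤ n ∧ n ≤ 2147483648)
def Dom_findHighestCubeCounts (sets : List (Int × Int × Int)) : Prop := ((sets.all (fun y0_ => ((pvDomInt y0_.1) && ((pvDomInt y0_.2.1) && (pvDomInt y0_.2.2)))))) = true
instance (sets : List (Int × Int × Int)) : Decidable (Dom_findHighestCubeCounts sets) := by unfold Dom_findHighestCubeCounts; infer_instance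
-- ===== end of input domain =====

-- B replaces A's single pass with three accumulators by three independent per-column
-- max passes, each seeding -1 as an explicit candidate (objective: simpler).


-- ===== PORT A =====
-- one pass over `sets`, three accumulators, branch `if count > highest` per colour
def findHighestCubeCounts (sets : List (Int × Int × Int)) : Int × Int × Int :=
  sets.foldl (fun st s =>
    let redCount := s.1
    let greenCount := s.2.1
    let blueCount := s.2.2
    let hr := if redCount > st.1 then redCount else st.1
    let hg := if greenCount > st.2.1 then greenCount else st.2.1
    let hb := if blueCount > st.2.2 then blueCount else st.2.2
    (hr, hg, hb)) (-1, -1, -1)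

-- ===== PORT B =====
-- Python's max over the nonempty list [-1] ++ column: fold of max starting at -1
def pyMaxNeg1 (xs : List Int) : Int := xs.foldl max (-1)

def findHighestCubeCounts_alt (sets : List (Int × Int × Int)) : Int × Int × Int :=
  (pyMaxNeg1 (sets.map (fun s => s.1)),
   pyMaxNeg1 (sets.map (fun s => s.2.1)),
   pyMaxNeg1 (sets.map (fun s => s.2.2)))

-- ===== PRECONDITION & SPEC =====
def Spec_findHighestCubeCounts (sets : List (Int × Int × Int)) (out : Int × Int × Int) : Prop := out = findHighestCubeCounts_alt sets
instance (sets : List (Int × Int × Int)) (out : Int × Int × Int) : Decidable (Spec_findHighestCubeCounts sets out) := by unfold Spec_findHighestCubeCounts; infer_instance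

-- ===== CLAIM (what is proved, stated in full; the proofs are below) =====
def Claim_equal_findHighestCubeCounts : Prop := ∀ (sets : List (Int × Int × Int)), Dom_findHighestCubeCounts sets → Spec_findHighestCubeCounts sets (findHighestCubeCounts sets)

-- ===== LEMMAS AND PROOFS =====
theorem foldl_triple_eq (sets : List (Int × Int × Int)) (a b c : Int) :
    sets.foldl (fun st s => (max st.1 s.1, max st.2.1 s.2.1, max st.2.2 s.2.2)) (a, b, c)
    = ((sets.map (fun s => s.1)).foldl max a,
       (sets.map (fun s => s.2.1)).foldl max b,
       (sets.map (fun s => s.2.2)).foldl max c) := by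
  induction sets generalizing a b c with
  | nil => simp
  | cons x xs ih => simp only [List.foldl_cons, List.map_cons, ih]

theorem stepfun_eq :
    (fun (st s : Int × Int × Int) =>
      let redCount := s.1
      let greenCount := s.2.1
      let blueCount := s.2.2
      let hr := if redCount > st.1 then redCount else st.1
      let hg := if greenCount > st.2.1 then greenCount else st.2.1
      let hb := if blueCount > st.2.2 then blueCount else st.2.2
      ((hr, hg, hb) : Int × Int × Int))
    = (fun st s => (max st.1 s.1, max st.2.1 s.2.1, max st.2.2 s.2.2)) := by
  have h : ∀ u v : Int, (if u > v then u else v) = max v u := by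
    intro u v; split <;> omega
  funext st s
  simp only [h]

-- ===== VERDICT (by name: the statement is the Claim_ definition above) =====
theorem findHighestCubeCounts_spec : Claim_equal_findHighestCubeCounts := by
  intro sets _
  unfold Spec_findHighestCubeCounts findHighestCubeCounts findHighestCubeCounts_alt pyMaxNeg1
  rw [stepfun_eq]
  exact foldl_triple_eq sets (-1) (-1) (-1)
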